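-- pv_equiv track=rewrite | github.com/CodecoolGlobal/lightweight-erp-python-sudocrem | accounting/accounting.py | which_year_max
-- ===== SOURCE A (Python) =====
-- def which_year_max(table):
--     """
--     Question: Which year has the highest profit? (profit = in - out)
--     Args:
--         table (list): data table to work on
--     Returns:
--         number
--     """
--     # your code
--     # type (string): in = income, out = outflow
--
--     data_year = 3
--     data_type = 4
--     data_amount = 5
--     profit_max = 0
--     year_max = 0
--     actual_year = 0
--     profit = 0
--
--     for data in table:
--         actual_year = data[data_year]
--         if data[data_year] == actual_year:
--             if data[data_type] == "in":
--                 profit += int(data[data_amount])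
--             elif data[data_type] == "out":
--                 profit -= int(data[data_amount])
--         if profit > profit_max:
--             year_max = int(actual_year)
--             profit_max = profit
--
--     return year_max
-- ===== SOURCE B (Python) =====
-- def which_year_max(table):
--     # Two-pass decomposition: build the prefix cumulative-profit table, then argmax scan.
--     deltas = [int(row[5]) if row[4] == "in" else -int(row[5]) if row[4] == "out" else 0
--               for row in table]
--     prefixes = []
--     total = 0
--     for d in deltas:
--         total += d
--         prefixes.append(total)
--     best = 0
--     year_best = 0
--     for row, p in zip(table, prefixes):
--         if p > best:
--             best = p
--             year_best = int(row[3])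
--     return year_best
-- ===== Notes on version B (the rewrite author's own statement) =====
-- stated objective: alternative
-- what changed: A's single fused loop (mutating profit/profit_max/year_max per row, with a dead year-comparison branch) is replaced by a two-pass decomposition: first build the prefix cumulative-profit table, then a separate argmax scan over the rows zipped with that table.
import Mathlib
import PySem

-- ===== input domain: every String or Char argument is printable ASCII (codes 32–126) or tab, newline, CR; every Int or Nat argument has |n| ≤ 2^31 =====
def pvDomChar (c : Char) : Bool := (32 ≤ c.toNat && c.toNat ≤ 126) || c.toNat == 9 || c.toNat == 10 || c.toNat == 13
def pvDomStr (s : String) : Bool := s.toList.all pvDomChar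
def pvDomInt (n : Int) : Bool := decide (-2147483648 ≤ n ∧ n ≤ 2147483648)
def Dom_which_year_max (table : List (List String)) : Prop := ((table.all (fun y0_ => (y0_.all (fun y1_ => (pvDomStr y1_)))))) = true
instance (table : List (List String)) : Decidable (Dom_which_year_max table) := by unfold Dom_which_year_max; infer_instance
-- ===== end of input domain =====

-- B replaces A's single fused loop by a two-pass decomposition (prefix cumulative-profit table, then argmax scan); same cost.


-- ===== PORT A =====
-- loop body of A's for-loop; state = (profit_max, year_max, profit).
-- getD defaults are never hit inside Pre_ (indexed fields exist, converted ints parse).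
def pvStepA (st : Int × Int × Int) (data : List String) : Int × Int × Int :=
  let profit_max := st.1
  let year_max := st.2.1
  let profit := st.2.2
  let actual_year := (PySem.List.pyGet? data 3).getD ""
  let profit :=
    if (PySem.List.pyGet? data 3).getD "" = actual_year then
      if (PySem.List.pyGet? data 4).getD "" = "in" then
        profit + (PySem.Int.ofStr? ((PySem.List.pyGet? data 5).getD "")).getD 0
      else if (PySem.List.pyGet? data 4).getD "" = "out" then
        profit - (PySem.Int.ofStr? ((PySem.List.pyGet? data 5).getD "")).getD 0
      else profit
    else profit
  if profit > profit_max then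
    (profit, (PySem.Int.ofStr? actual_year).getD 0, profit)
  else
    (profit_max, year_max, profit)

def which_year_max (table : List (List String)) : Int :=
  (table.foldl pvStepA (0, 0, 0)).2.1

-- ===== PORT B =====
def which_year_max_alt (table : List (List String)) : Int :=
  let deltas := table.map (fun row =>
    if (PySem.List.pyGet? row 4).getD "" = "in" then
      (PySem.Int.ofStr? ((PySem.List.pyGet? row 5).getD "")).getD 0
    else if (PySem.List.pyGet? row 4).getD "" = "out" then
      -((PySem.Int.ofStr? ((PySem.List.pyGet? row 5).getD "")).getD 0)
    else 0)
  let prefixes := (deltas.foldl (fun (acc : Int × List Int) d =>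
    (acc.1 + d, acc.2 ++ [acc.1 + d])) (0, [])).2
  let r := (table.zip prefixes).foldl (fun (st : Int × Int) rp =>
    if rp.2 > st.1 then (rp.2, (PySem.Int.ofStr? ((PySem.List.pyGet? rp.1 3).getD "")).getD 0)
    else st) (0, 0)
  r.2

-- ===== PRECONDITION & SPEC =====
-- pvDelta row: the signed profit contribution of one row; pvPrefixes s ds: running sums of ds from s.
-- (Used by Pre_ to say where Python's int(year) call happens; also used by the proofs below.)
def pvDelta (row : List String) : Int :=
  if (PySem.List.pyGet? row 4).getD "" = "in" then
    (PySem.Int.ofStr? ((PySem.List.pyGet? row 5).getD "")).getD 0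
  else if (PySem.List.pyGet? row 4).getD "" = "out" then
    -((PySem.Int.ofStr? ((PySem.List.pyGet? row 5).getD "")).getD 0)
  else 0

def pvPrefixes (s : Int) : List Int → List Int
  | [] => []
  | d :: ds => (s + d) :: pvPrefixes (s + d) ds

-- Pre_ = exactly where Python A (and B) return: rows have >= 5 fields; on rows of type
-- "in"/"out" there are >= 6 fields and the amount parses as an int; and the year parses on
-- the rows where the cumulative profit sets a new strictly positive record (only there does
-- Python call int(year)).
def Pre_which_year_max (table : List (List String)) : Prop :=
  (∀ row ∈ table, 5 ≤ row.length ∧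
    (((PySem.List.pyGet? row 4).getD "" = "in" ∨ (PySem.List.pyGet? row 4).getD "" = "out") →
      6 ≤ row.length ∧
      (PySem.Int.ofStr? ((PySem.List.pyGet? row 5).getD "")).isSome = true)) ∧
  (∀ i ∈ List.range table.length,
    ((pvPrefixes 0 (table.map pvDelta)).getD i 0 > 0 ∧
     ∀ j ∈ List.range i,
       (pvPrefixes 0 (table.map pvDelta)).getD j 0 < (pvPrefixes 0 (table.map pvDelta)).getD i 0) →
    (PySem.Int.ofStr? ((PySem.List.pyGet? (table.getD i []) 3).getD "")).isSome = true)

instance (table : List (List String)) : Decidable (Pre_which_year_max table) := by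
  unfold Pre_which_year_max; infer_instance

def pvWitness_which_year_max : List (List String) :=
  [["1", "a", "b", "2016", "in", "10"], ["2", "a", "b", "2017", "out", "3"]]

def Spec_which_year_max (table : List (List String)) (out : Int) : Prop := out = which_year_max_alt table
instance (table : List (List String)) (out : Int) : Decidable (Spec_which_year_max table out) := by unfold Spec_which_year_max; infer_instance

-- ===== CLAIM (what is proved, stated in full; the proofs are below) =====
def Claim_equal_which_year_max : Prop := ∀ (table : List (List String)), Dom_which_year_max table → Pre_which_year_max table → Spec_which_year_max table (which_year_max table)

-- ===== LEMMAS AND PROOFS =====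

def pvYear (row : List String) : Int :=
  (PySem.Int.ofStr? ((PySem.List.pyGet? row 3).getD "")).getD 0

lemma pvPrefixes_foldl (ds : List Int) (s : Int) (acc : List Int) :
    (ds.foldl (fun (acc : Int × List Int) d => (acc.1 + d, acc.2 ++ [acc.1 + d])) (s, acc)).2
      = acc ++ pvPrefixes s ds := by
  induction ds generalizing s acc with
  | nil => simp [pvPrefixes]
  | cons d ds ih => simp [pvPrefixes, List.foldl, ih, List.append_assoc]

lemma pvStepA_eq (st : Int × Int × Int) (row : List String) :
    pvStepA st row =
      (if st.2.2 + pvDelta row > st.1 then (st.2.2 + pvDelta row, pvYear row, st.2.2 + pvDelta row)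
       else (st.1, st.2.1, st.2.2 + pvDelta row)) := by
  have hd : (if (PySem.List.pyGet? row 4).getD "" = "in" then
        st.2.2 + (PySem.Int.ofStr? ((PySem.List.pyGet? row 5).getD "")).getD 0
      else if (PySem.List.pyGet? row 4).getD "" = "out" then
        st.2.2 - (PySem.Int.ofStr? ((PySem.List.pyGet? row 5).getD "")).getD 0
      else st.2.2) = st.2.2 + pvDelta row := by
    unfold pvDelta; split_ifs <;> ring
  simp [pvStepA, pvYear, hd]

lemma pvMain (table : List (List String)) (pm ym p : Int) :
    table.foldl pvStepA (pm, ym, p)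
    = (let r := (table.zip (pvPrefixes p (table.map pvDelta))).foldl
        (fun (st : Int × Int) rp => if rp.2 > st.1 then (rp.2, pvYear rp.1) else st) (pm, ym)
       (r.1, r.2, p + (table.map pvDelta).sum)) := by
  induction table generalizing pm ym p with
  | nil => simp
  | cons row rest ih =>
    rw [List.foldl_cons, pvStepA_eq]
    by_cases h : p + pvDelta row > pm
    · rw [if_pos h]; rw [ih]; simp [pvPrefixes, h, add_assoc]
    · rw [if_neg h]; rw [ih]; simp [pvPrefixes, h, add_assoc]

-- ===== VERDICT (by name: the statement is the Claim_ definition above) =====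
theorem which_year_max_spec : Claim_equal_which_year_max := by
  intro table _ _
  unfold Spec_which_year_max which_year_max which_year_max_alt
  rw [pvMain]
  simp only [pvPrefixes_foldl, List.nil_append]
  rfl
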